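-- pv_equiv track=rewrite | github.com/ncmiller/garbage | adventofcode/2020/day20.py | transform_tile
-- ===== SOURCE A (Python) =====
-- def horiz_flip(tile):
--     return [row[::-1] for row in tile]
--
-- def rotate90CW(tile):
--     n = len(tile)
--     new_tile = []
--     for x in range(n):
--         row = ''
--         for y in range(n):
--             row += tile[n - y - 1][x]
--         new_tile.append(row)
--     return new_tile
--
-- def transform_tile(tile, transform):
--     tid, t = tile
--     for op in transform:
--         if op == 'h':
--             t = horiz_flip(t)
--         elif op == 'r':
--             t = rotate90CW(t)
--     return (tid, t)
-- ===== SOURCE B (Python) =====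
-- def transform_tile(tile, transform):
--     tid, t = tile
--     # split the op list at the first 'r'
--     idx = 0
--     while idx < len(transform) and transform[idx] != 'r':
--         idx += 1
--     pre, rest = transform[:idx], transform[idx:]
--     # before any rotation only horizontal flips matter, and only their parity
--     if pre.count('h') % 2 == 1:
--         t = [row[::-1] for row in t]
--     if not rest:
--         return (tid, t)
--     # compose the remaining ops into one D4 element: k quarter-turns CW, then flip f
--     k, f = 0, 0
--     for op in rest:
--         if op == 'r':
--             k = (k + 1) % 4
--         elif op == 'h':
--             k, f = (-k) % 4, 1 - f
--     n = len(t)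
--     def src(i, j):
--         for _ in range(k):
--             i, j = n - 1 - j, i
--         if f == 1:
--             j = n - 1 - j
--         return i, j
--     new_t = []
--     for i in range(n):
--         row = []
--         for j in range(n):
--             a, b = src(i, j)
--             row.append(t[a][b])
--         new_t.append(''.join(row))
--     return (tid, new_t)
-- ===== Notes on version B (the rewrite author's own statement) =====
-- stated objective: alternative
-- what changed: Instead of rebuilding the full tile once per op, B folds the ops into a single composed D4 index mapping (flip parity before the first rotation, then a (quarter-turns, flip) pair) and builds the output tile in one n×n pass reading the source tile through that mapping.
import Mathlib
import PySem

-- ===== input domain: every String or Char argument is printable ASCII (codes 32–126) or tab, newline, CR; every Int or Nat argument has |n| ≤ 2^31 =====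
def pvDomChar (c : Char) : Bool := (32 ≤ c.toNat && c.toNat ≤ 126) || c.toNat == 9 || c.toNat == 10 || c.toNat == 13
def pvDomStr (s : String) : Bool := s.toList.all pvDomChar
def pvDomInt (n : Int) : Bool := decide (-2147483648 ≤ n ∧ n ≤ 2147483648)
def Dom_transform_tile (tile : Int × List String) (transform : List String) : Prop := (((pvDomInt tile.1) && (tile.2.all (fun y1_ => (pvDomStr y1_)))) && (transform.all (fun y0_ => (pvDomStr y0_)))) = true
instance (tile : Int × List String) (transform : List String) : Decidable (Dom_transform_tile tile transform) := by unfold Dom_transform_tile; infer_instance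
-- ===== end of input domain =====

-- B replaces A's per-op full-tile rebuilds by one composed D4 index mapping applied in a single
-- n×n pass (objective: alternative decomposition; same asymptotic cost per tile, fewer passes).

-- ===== PORT A =====
def pvHorizFlip (t : List String) : List String :=
  t.map (fun row => (PySem.Str.slice? row none none (-1)).getD row)

def pvRotate90CW (t : List String) : List String :=
  let n : Int := (t.length : Int)
  (PySem.List.pyRange 0 n 1).foldl (fun new_tile x =>
    new_tile ++ [String.ofList ((PySem.List.pyRange 0 n 1).foldl (fun row y =>
      row ++ [(PySem.Str.pyGet? (PySem.List.pyGetD t (n - y - 1) "") x).getD ' ']) [])]) []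

def transform_tile (tile : Int × List String) (transform : List String) : Int × List String :=
  (tile.1, transform.foldl (fun t op =>
    if op == "h" then pvHorizFlip t
    else if op == "r" then pvRotate90CW t
    else t) tile.2)

-- ===== PORT B =====
-- src(i,j): apply k clockwise quarter-turn index maps, then the horizontal flip if f = 1
def pvSrcIter (n : Int) : Nat → Int × Int → Int × Int
  | 0, p => p
  | m + 1, p => pvSrcIter n m (n - 1 - p.2, p.1)

def pvSrc (n k f i j : Int) : Int × Int :=
  let p := pvSrcIter n k.toNat (i, j)
  if f == 1 then (p.1, n - 1 - p.2) else p

def pvUpd (p : Int × Int) (op : String) : Int × Int :=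
  if op == "r" then (PySem.Int.mod (p.1 + 1) 4, p.2)
  else if op == "h" then (PySem.Int.mod (-p.1) 4, 1 - p.2)
  else p

def transform_tile_alt (tile : Int × List String) (transform : List String) : Int × List String :=
  let pre := transform.takeWhile (fun op => !(op == "r"))
  let rest := transform.dropWhile (fun op => !(op == "r"))
  let t := if pre.count "h" % 2 == 1
           then tile.2.map (fun row => (PySem.Str.slice? row none none (-1)).getD row)
           else tile.2
  if rest.isEmpty then (tile.1, t)
  else
    let kf := rest.foldl pvUpd ((0 : Int), (0 : Int))
    let n : Int := (t.length : Int)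
    (tile.1, (PySem.List.pyRange 0 n 1).map (fun i =>
      String.ofList ((PySem.List.pyRange 0 n 1).map (fun j =>
        let p := pvSrc n kf.1 kf.2 i j
        (PySem.Str.pyGet? (PySem.List.pyGetD t p.1 "") p.2).getD ' '))))

-- ===== PRECONDITION & SPEC =====
-- Pre_ excludes exactly the inputs where Python A raises IndexError: a rotation requested while
-- some row is shorter than the number of rows (B raises there too).
def Pre_transform_tile (tile : Int × List String) (transform : List String) : Prop :=
  "r" ∈ transform → ∀ row ∈ tile.2, tile.2.length ≤ row.toList.length
instance (tile : Int × List String) (transform : List String) : Decidable (Pre_transform_tile tile transform) := by unfold Pre_transform_tile; infer_instance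

def pvWitness_transform_tile : (Int × List String) × List String := ((1, ["ab", "cd"]), ["h", "r"])

def Spec_transform_tile (tile : Int × List String) (transform : List String) (out : Int × List String) : Prop := out = transform_tile_alt tile transform
instance (tile : Int × List String) (transform : List String) (out : Int × List String) : Decidable (Spec_transform_tile tile transform out) := by unfold Spec_transform_tile; infer_instance

-- ===== CLAIM (what is proved, stated in full; the proofs are below) =====
def Claim_equal_transform_tile : Prop := ∀ (tile : Int × List String) (transform : List String), Dom_transform_tile tile transform → Pre_transform_tile tile transform → Spec_transform_tile tile transform (transform_tile tile transform)

-- ===== LEMMAS AND PROOFS =====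

def pvStep (t : List String) (op : String) : List String :=
  if op == "h" then pvHorizFlip t else if op == "r" then pvRotate90CW t else t

def pvRead (t : List String) (p : Int × Int) : Char :=
  (PySem.Str.pyGet? (PySem.List.pyGetD t p.1 "") p.2).getD ' '

def pvBuild (n : Int) (g : Int × Int → Int × Int) (t : List String) : List String :=
  (PySem.List.pyRange 0 n 1).map (fun i =>
    String.ofList ((PySem.List.pyRange 0 n 1).map (fun j => pvRead t (g (i, j)))))

lemma pv_mod4 (a : Int) : 0 ≤ PySem.Int.mod a 4 ∧ PySem.Int.mod a 4 < 4 := by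
  unfold PySem.Int.mod
  exact ⟨Int.fmod_nonneg_of_pos a (by norm_num), Int.fmod_lt_of_pos a (by norm_num)⟩

lemma pv_hflip_eq (t : List String) :
    pvHorizFlip t = t.map (fun row => String.ofList row.toList.reverse) := by
  simp [pvHorizFlip, PySem.Str.slice?_none_none_neg_one]

lemma pv_hflip_hflip (t : List String) : pvHorizFlip (pvHorizFlip t) = t := by
  simp only [pv_hflip_eq, List.map_map]
  have h : ((fun row => String.ofList row.toList.reverse) ∘
      fun row : String => String.ofList row.toList.reverse) = id := by
    funext row
    simp [Function.comp]
  rw [h, List.map_id]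

lemma pv_build_len (n : Int) (g : Int × Int → Int × Int) (t : List String) :
    (pvBuild n g t).length = n.toNat := by
  simp [pvBuild, PySem.List.length_pyRange_one]

lemma pv_rev_map {α : Type} (n : Int) (f : Int → α) :
    ((PySem.List.pyRange 0 n 1).map f).reverse
      = (PySem.List.pyRange 0 n 1).map (fun j => f (n - 1 - j)) := by
  have h := PySem.List.pyRange_neg_one_eq_reverse (n - 1) (-1)
  have h2 : (-1 : Int) + 1 = 0 := by norm_num
  have h3 : n - 1 + 1 = n := by ring
  rw [h2, h3] at h
  rw [← List.map_reverse, ← h, PySem.List.pyRange_neg_one, PySem.List.pyRange_one]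
  simp only [List.map_map]
  have h4 : (n - 1 - (-1)).toNat = (n - 0).toNat := by omega
  rw [h4]
  apply List.map_congr_left
  intro k _
  simp only [Function.comp]
  congr 1
  omega

lemma pv_build_read (n : Int) (g : Int × Int → Int × Int) (t : List String) (i j : Int)
    (h0 : 0 ≤ i) (h1 : i < n) (h2 : 0 ≤ j) (h3 : j < n) :
    pvRead (pvBuild n g t) (i, j) = pvRead t (g (i, j)) := by
  unfold pvRead pvBuild
  rw [PySem.List.pyGetD_map_pyRange_of_nonneg _ n i _ h0 h1]
  have hj : j = ((j.toNat : Nat) : Int) := by omega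
  rw [hj, PySem.Str.pyGet?_natCast]
  have hlen : j.toNat < ((PySem.List.pyRange 0 n 1).map (fun j => pvRead t (g (i, j)))).length := by
    simp [PySem.List.length_pyRange_one]; omega
  simp only [String.toList_ofList]
  rw [List.getElem?_eq_getElem hlen, List.getElem_map, PySem.List.getElem_pyRange_one]
  simp only [Option.getD_some, zero_add]
  rfl

lemma pv_build_ext (n : Int) (g g' : Int × Int → Int × Int) (t t' : List String)
    (h : ∀ i j : Int, 0 ≤ i → i < n → 0 ≤ j → j < n → pvRead t (g (i, j)) = pvRead t' (g' (i, j))) :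
    pvBuild n g t = pvBuild n g' t' := by
  unfold pvBuild
  apply List.map_congr_left
  intro i hi
  rw [PySem.List.mem_pyRange_one] at hi
  congr 1
  apply List.map_congr_left
  intro j hj
  rw [PySem.List.mem_pyRange_one] at hj
  exact h i j hi.1 hi.2 hj.1 hj.2

lemma pv_rot_eq_build (t : List String) :
    pvRotate90CW t = pvBuild (t.length : Int) (fun p => ((t.length : Int) - p.2 - 1, p.1)) t := by
  simp only [pvRotate90CW, pvBuild, pvRead, PySem.List.foldl_append_singleton_eq_map,
    List.nil_append]

lemma pv_rot_build (n : Nat) (g : Int × Int → Int × Int) (t : List String) :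
    pvRotate90CW (pvBuild (n : Int) g t)
      = pvBuild (n : Int) (fun p => g ((n : Int) - p.2 - 1, p.1)) t := by
  rw [pv_rot_eq_build]
  have hl : ((pvBuild (n : Int) g t).length : Int) = (n : Int) := by
    rw [pv_build_len]; omega
  rw [hl]
  apply pv_build_ext
  intro i j h0 h1 h2 h3
  exact pv_build_read (n : Int) g t _ _ (by omega) (by omega) (by omega) (by omega)

lemma pv_hflip_build (n : Nat) (g : Int × Int → Int × Int) (t : List String) :
    pvHorizFlip (pvBuild (n : Int) g t)
      = pvBuild (n : Int) (fun p => g (p.1, (n : Int) - 1 - p.2)) t := by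
  rw [pv_hflip_eq]
  unfold pvBuild
  rw [List.map_map]
  apply List.map_congr_left
  intro i _
  simp only [Function.comp, String.toList_ofList]
  rw [pv_rev_map]

lemma pvSrcIter_zero (n : Int) (a b : Int) : pvSrcIter n 0 (a, b) = (a, b) := rfl

lemma pvSrcIter_one (n : Int) (a b : Int) : pvSrcIter n 1 (a, b) = (n - 1 - b, a) := rfl

lemma pvSrcIter_two (n : Int) (a b : Int) : pvSrcIter n 2 (a, b) = (n - 1 - a, n - 1 - b) := rfl

lemma pvSrcIter_three (n : Int) (a b : Int) :
    pvSrcIter n 3 (a, b) = (n - 1 - (n - 1 - b), n - 1 - a) := rfl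

lemma pv_g1 (n k f i j : Int) (hk0 : 0 ≤ k) (hk4 : k < 4) :
    pvSrc n k f (n - j - 1) i = pvSrc n (PySem.Int.mod (k + 1) 4) f i j := by
  rcases (by omega : k = 0 ∨ k = 1 ∨ k = 2 ∨ k = 3) with rfl | rfl | rfl | rfl <;>
    · simp only [pvSrc,
        show PySem.Int.mod (0 + 1) 4 = 1 from by decide,
        show PySem.Int.mod (1 + 1) 4 = 2 from by decide,
        show PySem.Int.mod (2 + 1) 4 = 3 from by decide,
        show PySem.Int.mod (3 + 1) 4 = 0 from by decide,
        show ((0 : Int)).toNat = 0 from rfl, show ((1 : Int)).toNat = 1 from rfl,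
        show ((2 : Int)).toNat = 2 from rfl, show ((3 : Int)).toNat = 3 from rfl,
        pvSrcIter_zero, pvSrcIter_one, pvSrcIter_two, pvSrcIter_three]
      split <;> (refine Prod.ext ?_ ?_ <;> (dsimp only; try omega))

lemma pv_g2 (n k f i j : Int) (hk0 : 0 ≤ k) (hk4 : k < 4) (hf : f = 0 ∨ f = 1) :
    pvSrc n k f i (n - 1 - j) = pvSrc n (PySem.Int.mod (-k) 4) (1 - f) i j := by
  rcases (by omega : k = 0 ∨ k = 1 ∨ k = 2 ∨ k = 3) with rfl | rfl | rfl | rfl <;>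
    rcases hf with rfl | rfl <;>
    · simp only [pvSrc,
        show PySem.Int.mod (-0 : Int) 4 = 0 from by decide,
        show PySem.Int.mod (-1 : Int) 4 = 3 from by decide,
        show PySem.Int.mod (-2 : Int) 4 = 2 from by decide,
        show PySem.Int.mod (-3 : Int) 4 = 1 from by decide,
        show ((1 : Int) - 0) = 1 from by norm_num,
        show ((1 : Int) - 1) = 0 from by norm_num,
        show (((0 : Int)) == 1) = false from by decide,
        show (((1 : Int)) == 1) = true from by decide,
        Bool.false_eq_true, if_false, if_true,
        show ((0 : Int)).toNat = 0 from rfl, show ((1 : Int)).toNat = 1 from rfl,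
        show ((2 : Int)).toNat = 2 from rfl, show ((3 : Int)).toNat = 3 from rfl,
        pvSrcIter_zero, pvSrcIter_one, pvSrcIter_two, pvSrcIter_three]
      try (refine Prod.ext ?_ ?_ <;> (dsimp only; try omega))

lemma pv_main (ops : List String) : ∀ (k f : Int) (n : Nat) (t : List String),
    0 ≤ k → k < 4 → (f = 0 ∨ f = 1) →
    List.foldl pvStep (pvBuild (n : Int) (fun p => pvSrc (n : Int) k f p.1 p.2) t) ops
      = pvBuild (n : Int)
          (fun p => pvSrc (n : Int) (List.foldl pvUpd (k, f) ops).1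
            (List.foldl pvUpd (k, f) ops).2 p.1 p.2) t := by
  induction ops with
  | nil => intro k f n t _ _ _; rfl
  | cons op rest ih =>
    intro k f n t hk0 hk4 hf
    simp only [List.foldl_cons]
    by_cases hr : op = "r"
    · subst hr
      have hstep : pvStep (pvBuild (n : Int) (fun p => pvSrc (n : Int) k f p.1 p.2) t) "r"
          = pvRotate90CW (pvBuild (n : Int) (fun p => pvSrc (n : Int) k f p.1 p.2) t) := by
        unfold pvStep
        rw [if_neg (by simp), if_pos (by simp)]
      rw [hstep, pv_rot_build]
      have hbe : pvBuild (n : Int)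
            (fun p => (fun q : Int × Int => pvSrc (n : Int) k f q.1 q.2) ((n : Int) - p.2 - 1, p.1)) t
          = pvBuild (n : Int) (fun p => pvSrc (n : Int) (PySem.Int.mod (k + 1) 4) f p.1 p.2) t := by
        apply pv_build_ext
        intro i j _ _ _ _
        congr 1
        exact pv_g1 (n : Int) k f i j hk0 hk4
      rw [hbe]
      have hupd : pvUpd (k, f) "r" = (PySem.Int.mod (k + 1) 4, f) := by
        unfold pvUpd
        rw [if_pos (by simp)]
      rw [hupd]
      exact ih _ _ n t (pv_mod4 (k + 1)).1 (pv_mod4 (k + 1)).2 hf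
    · by_cases hh : op = "h"
      · subst hh
        have hstep : pvStep (pvBuild (n : Int) (fun p => pvSrc (n : Int) k f p.1 p.2) t) "h"
            = pvHorizFlip (pvBuild (n : Int) (fun p => pvSrc (n : Int) k f p.1 p.2) t) := by
          unfold pvStep
          rw [if_pos (by simp)]
        rw [hstep, pv_hflip_build]
        have hbe : pvBuild (n : Int)
              (fun p => (fun q : Int × Int => pvSrc (n : Int) k f q.1 q.2) (p.1, (n : Int) - 1 - p.2)) t
            = pvBuild (n : Int) (fun p => pvSrc (n : Int) (PySem.Int.mod (-k) 4) (1 - f) p.1 p.2) t := by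
          apply pv_build_ext
          intro i j _ _ _ _
          congr 1
          exact pv_g2 (n : Int) k f i j hk0 hk4 hf
        rw [hbe]
        have hupd : pvUpd (k, f) "h" = (PySem.Int.mod (-k) 4, 1 - f) := by
          unfold pvUpd
          rw [if_neg (by simp), if_pos (by simp)]
        rw [hupd]
        exact ih _ _ n t (pv_mod4 (-k)).1 (pv_mod4 (-k)).2 (by rcases hf with rfl | rfl <;> simp)
      · have hstep : pvStep (pvBuild (n : Int) (fun p => pvSrc (n : Int) k f p.1 p.2) t) op
            = pvBuild (n : Int) (fun p => pvSrc (n : Int) k f p.1 p.2) t := by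
          unfold pvStep
          rw [if_neg (by simp [hh]), if_neg (by simp [hr])]
        have hupd : pvUpd (k, f) op = (k, f) := by
          unfold pvUpd
          rw [if_neg (by simp [hr]), if_neg (by simp [hh])]
        rw [hstep, hupd]
        exact ih _ _ n t hk0 hk4 hf

lemma pv_prefix (ops : List String) : ∀ t : List String, (∀ op ∈ ops, (op == "r") = false) →
    List.foldl pvStep t ops = if ops.count "h" % 2 == 1 then pvHorizFlip t else t := by
  induction ops with
  | nil => intro t _; simp
  | cons op rest ih =>
    intro t h
    have hr : (op == "r") = false := h op (by simp)
    have hr' : op ≠ "r" := by intro hq; rw [hq] at hr; simp at hr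
    simp only [List.foldl_cons]
    by_cases hh : op = "h"
    · subst hh
      have hstep : pvStep t "h" = pvHorizFlip t := by
        unfold pvStep
        rw [if_pos (by simp)]
      rw [hstep, ih _ (fun o ho => h o (by simp [ho])), List.count_cons_self]
      by_cases hp : rest.count "h" % 2 = 1
      · have h1 : (rest.count "h" % 2 == 1) = true := by simp [hp]
        have h2 : ((rest.count "h" + 1) % 2 == 1) = false := by simp; omega
        rw [if_pos h1, if_neg (by simp [h2]), pv_hflip_hflip]
      · have h1 : (rest.count "h" % 2 == 1) = false := by simp; omega
        have h2 : ((rest.count "h" + 1) % 2 == 1) = true := by simp; omega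
        rw [if_neg (by simp [h1]), if_pos h2]
    · have hstep : pvStep t op = t := by
        unfold pvStep
        rw [if_neg (by simp [hh]), if_neg (by simp [hr'])]
      have hc : List.count "h" (op :: rest) = rest.count "h" := by
        rw [List.count_cons]
        simp [hh]
      rw [hstep, hc, ih _ (fun o ho => h o (by simp [ho]))]

-- ===== VERDICT (by name: the statement is the Claim_ definition above) =====
theorem transform_tile_spec : Claim_equal_transform_tile := by
  intro tile transform _ _
  unfold Spec_transform_tile
  show transform_tile tile transform = transform_tile_alt tile transform
  have hstepf : (fun (t : List String) (op : String) =>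
      if op == "h" then pvHorizFlip t else if op == "r" then pvRotate90CW t else t) = pvStep := rfl
  have hpvh : tile.2.map (fun row => (PySem.Str.slice? row none none (-1)).getD row)
      = pvHorizFlip tile.2 := rfl
  have hpreops : ∀ op ∈ transform.takeWhile (fun op => !(op == "r")), (op == "r") = false := by
    intro op hop
    have h2 := List.mem_takeWhile_imp hop
    simpa using h2
  have hA : transform_tile tile transform
      = (tile.1, List.foldl pvStep
          (if (transform.takeWhile (fun op => !(op == "r"))).count "h" % 2 == 1
            then pvHorizFlip tile.2 else tile.2)
          (transform.dropWhile (fun op => !(op == "r")))) := by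
    unfold transform_tile
    rw [hstepf]
    conv_lhs =>
      rw [show transform = transform.takeWhile (fun op => !(op == "r"))
            ++ transform.dropWhile (fun op => !(op == "r")) from List.takeWhile_append_dropWhile.symm]
    rw [List.foldl_append, pv_prefix _ _ hpreops]
  rw [hA]
  simp only [transform_tile_alt, hpvh]
  rcases hrest : transform.dropWhile (fun op => !(op == "r")) with _ | ⟨op, rest'⟩
  · simp only [List.isEmpty_nil, if_true, List.foldl_nil]
  · have hop : op = "r" := by
      have h2 := List.head_dropWhile_not (p := fun op => !(op == "r")) (l := transform)
        (by simp [hrest])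
      simp only [hrest, List.head_cons] at h2
      simpa using h2
    subst hop
    simp only [List.isEmpty_cons, Bool.false_eq_true, if_false, List.foldl_cons]
    have hstep1 : ∀ t1 : List String, pvStep t1 "r" = pvRotate90CW t1 := by
      intro t1
      unfold pvStep
      rw [if_neg (by simp), if_pos (by simp)]
    rw [hstep1, pv_rot_eq_build]
    have hupd1 : pvUpd (0, 0) "r" = ((1 : Int), (0 : Int)) := by decide
    rw [hupd1]
    have hinit : ∀ t1 : List String,
        pvBuild ((t1.length : Nat) : Int) (fun p => ((t1.length : Int) - p.2 - 1, p.1)) t1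
          = pvBuild ((t1.length : Nat) : Int) (fun p => pvSrc ((t1.length : Int)) 1 0 p.1 p.2) t1 := by
      intro t1
      apply pv_build_ext
      intro i j _ _ _ _
      have hsrc : pvSrc ((t1.length : Int)) 1 0 i j = ((t1.length : Int) - 1 - j, i) := rfl
      rw [hsrc]
      congr 1
      refine Prod.ext ?_ ?_ <;> (dsimp only; try omega)
    rw [hinit]
    rw [pv_main rest' 1 0 _ _ (by norm_num) (by norm_num) (Or.inl rfl)]
    rfl
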